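-- pv_equiv track=rewrite | github.com/Giangattt123/Python-PTIT | CodePtit/PYKT098-LBSN.py | check
-- ===== SOURCE A (Python) =====
-- def check(s) :
-- 	k = 0
-- 	for i in s :
-- 		if not i.isdigit() :
-- 			return True
-- 		k = k * 10 + int(i)
-- 	if k <= (2**31 - 1) and k >= -(2**31) :
-- 		return False
-- 	return True
-- ===== SOURCE B (Python) =====
-- def check(s):
--     # validation pass, then length/lexicographic comparison against the 2**31-1 literal
--     if not all(c.isdigit() for c in s):
--         return True
--     t = s.lstrip("0")
--     return len(t) > 10 or (len(t) == 10 and t > "2147483647")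
-- ===== Notes on version B (the rewrite author's own statement) =====
-- stated objective: alternative
-- what changed: A folds the digits into a Horner accumulator and compares the resulting integer against 2**31-1; B first validates all characters with all(isdigit), then strips leading zeros and decides overflow by digit count plus a lexicographic string comparison against the ten-digit decimal string of 2**31-1, doing no integer arithmetic at all.
import Mathlib
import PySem

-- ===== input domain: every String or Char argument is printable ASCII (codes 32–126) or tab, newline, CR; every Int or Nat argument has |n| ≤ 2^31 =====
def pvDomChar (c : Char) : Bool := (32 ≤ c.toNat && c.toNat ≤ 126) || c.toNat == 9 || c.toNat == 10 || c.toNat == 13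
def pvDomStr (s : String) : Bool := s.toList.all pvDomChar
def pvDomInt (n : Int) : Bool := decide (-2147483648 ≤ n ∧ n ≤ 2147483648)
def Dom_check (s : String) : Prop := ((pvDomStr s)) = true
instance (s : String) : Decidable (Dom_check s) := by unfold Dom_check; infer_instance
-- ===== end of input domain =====

-- B replaces A's single Horner-accumulation scan by a digits-validation pass plus a
-- length/lexicographic comparison of the zero-stripped string against "2147483647" (objective: alternative).

-- ===== PORT A =====
-- the for-loop with its accumulator k and early `return True`; int(i) on a digit char is its code minus 48 (exact on ASCII digits)
def checkGo : List Char → Int → Bool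
  | [], k => if k ≤ 2 ^ 31 - 1 ∧ -(2 ^ 31) ≤ k then false else true
  | c :: cs, k =>
    if ¬ PySem.Chars.isdigit c then true
    else checkGo cs (k * 10 + ((c.toNat : Int) - 48))

def check (s : String) : Bool := checkGo s.toList 0

-- ===== PORT B =====
def check_alt (s : String) : Bool :=
  if ¬ (s.toList.all PySem.Chars.isdigit) then true
  else
    -- s.lstrip("0") removes exactly the leading '0' characters
    let t := s.toList.dropWhile (· == '0')
    decide (10 < t.length) || (decide (t.length = 10) && decide ("2147483647".toList < t))

-- ===== PRECONDITION & SPEC =====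
def Spec_check (s : String) (out : Bool) : Prop := out = check_alt s
instance (s : String) (out : Bool) : Decidable (Spec_check s out) := by unfold Spec_check; infer_instance

-- ===== CLAIM (what is proved, stated in full; the proofs are below) =====
def Claim_equal_check : Prop := ∀ (s : String), Dom_check s → Spec_check s (check s)

-- ===== LEMMAS AND PROOFS =====

-- the Horner value A's loop accumulates
def pvVal (k : Int) (cs : List Char) : Int :=
  cs.foldl (fun a c => a * 10 + ((c.toNat : Int) - 48)) k

theorem pvVal_nil (k : Int) : pvVal k [] = k := rfl
theorem pvVal_cons (k : Int) (c : Char) (cs : List Char) :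
    pvVal k (c :: cs) = pvVal (k * 10 + ((c.toNat : Int) - 48)) cs := rfl

theorem isdigit_bounds {c : Char} (h : PySem.Chars.isdigit c = true) :
    48 ≤ c.toNat ∧ c.toNat ≤ 57 := by
  simp [PySem.Chars.isdigit, Char.le_def] at h
  exact ⟨h.1, h.2⟩

theorem char_lt_iff (c d : Char) : d < c ↔ d.toNat < c.toNat := by
  rw [Char.lt_def, UInt32.lt_iff_toNat_lt]; exact Iff.rfl

theorem char_eq_iff (c d : Char) : d = c ↔ d.toNat = c.toNat :=
  ⟨fun h => h ▸ rfl, fun h => Char.ext (UInt32.toNat_inj.mp h)⟩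

theorem pvVal_split (cs : List Char) : ∀ k : Int,
    pvVal k cs = k * 10 ^ cs.length + pvVal 0 cs := by
  induction cs with
  | nil => intro k; simp [pvVal_nil]
  | cons c cs ih =>
    intro k
    rw [pvVal_cons, pvVal_cons, ih, ih (0 * 10 + _)]
    simp only [List.length_cons, pow_succ]
    ring

theorem pvVal_bounds {cs : List Char} (h : cs.all PySem.Chars.isdigit = true) :
    0 ≤ pvVal 0 cs ∧ pvVal 0 cs < 10 ^ cs.length := by
  induction cs with
  | nil => simp [pvVal_nil]
  | cons c cs ih =>
    simp only [List.all_cons, Bool.and_eq_true] at h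
    obtain ⟨hb1, hb2⟩ := isdigit_bounds h.1
    obtain ⟨ih1, ih2⟩ := ih h.2
    have hd1 : (0 : Int) ≤ (c.toNat : Int) - 48 := by omega
    have hd2 : ((c.toNat : Int) - 48) ≤ 9 := by omega
    have hp : (0 : Int) ≤ 10 ^ cs.length := pow_nonneg (by norm_num) _
    rw [pvVal_cons, pvVal_split]
    constructor
    · nlinarith
    · simp only [List.length_cons, pow_succ]
      nlinarith

theorem pvVal_dropZeros (cs : List Char) :
    pvVal 0 (cs.dropWhile (· == '0')) = pvVal 0 cs := by
  induction cs with
  | nil => rfl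
  | cons c cs ih =>
    by_cases hc : c = '0'
    · subst hc
      rw [List.dropWhile_cons_of_pos (by decide), ih, pvVal_cons]
      congr 1
    · rw [List.dropWhile_cons_of_neg (by simpa using hc)]

-- equal-length all-digit lists: Horner value order is lexicographic order
theorem pvVal_lt_iff_lex (a : List Char) : ∀ b : List Char,
    a.all PySem.Chars.isdigit = true → b.all PySem.Chars.isdigit = true →
    a.length = b.length → (pvVal 0 b < pvVal 0 a ↔ b < a) := by
  induction a with
  | nil =>
    intro b _ _ hlen
    rw [List.length_nil] at hlen
    rw [List.eq_nil_of_length_eq_zero hlen.symm]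
    simp
  | cons c a ih =>
    intro b hda hdb hlen
    cases b with
    | nil => simp at hlen
    | cons d b =>
      simp only [List.all_cons, Bool.and_eq_true] at hda hdb
      simp only [List.length_cons, Nat.add_right_cancel_iff] at hlen
      obtain ⟨hc1, hc2⟩ := isdigit_bounds hda.1
      obtain ⟨hd1, hd2⟩ := isdigit_bounds hdb.1
      obtain ⟨ha1, ha2⟩ := pvVal_bounds hda.2
      obtain ⟨hb1, hb2⟩ := pvVal_bounds hdb.2
      have e1 : pvVal (0 * 10 + ((c.toNat : Int) - 48)) a
          = ((c.toNat : Int) - 48) * 10 ^ a.length + pvVal 0 a := by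
        rw [pvVal_split]; ring
      have e2 : pvVal (0 * 10 + ((d.toNat : Int) - 48)) b
          = ((d.toNat : Int) - 48) * 10 ^ b.length + pvVal 0 b := by
        rw [pvVal_split]; ring
      rw [pvVal_cons, pvVal_cons, e1, e2, hlen,
        List.cons_lt_cons_iff, ← ih b hda.2 hdb.2 hlen, char_lt_iff, char_eq_iff]
      rw [hlen] at ha2
      have hp : (0 : Int) < 10 ^ b.length := pow_pos (by norm_num) _
      constructor
      · intro hlt
        by_cases hdc : d.toNat < c.toNat
        · exact Or.inl hdc
        · have hCle : (c.toNat : Int) ≤ (d.toNat : Int) := by exact_mod_cast Nat.not_lt.mp hdc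
          have hDle : (d.toNat : Int) ≤ (c.toNat : Int) := by nlinarith
          have hEq : (d.toNat : Int) = (c.toNat : Int) := le_antisymm hDle hCle
          refine Or.inr ⟨by exact_mod_cast hEq, ?_⟩
          have hprod : ((d.toNat : Int) - 48) * 10 ^ b.length
              = ((c.toNat : Int) - 48) * 10 ^ b.length := by rw [hEq]
          linarith [hlt, hprod.le, hprod.ge]
      · rintro (hdc | ⟨hdc, hvb⟩)
        · have hsucc : ((d.toNat : Int)) + 1 ≤ (c.toNat : Int) := by exact_mod_cast hdc
          nlinarith
        · have hEq : ((d.toNat : Int)) = (c.toNat : Int) := by exact_mod_cast hdc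
          have hprod : ((d.toNat : Int) - 48) * 10 ^ b.length
              = ((c.toNat : Int) - 48) * 10 ^ b.length := by rw [hEq]
          linarith [hprod.le, hprod.ge]

-- A's loop returns True once it meets a non-digit character
theorem checkGo_of_not_all (cs : List Char) : ∀ k : Int,
    cs.all PySem.Chars.isdigit = false → checkGo cs k = true := by
  induction cs with
  | nil => simp
  | cons c cs ih =>
    intro k h
    simp only [List.all_cons, Bool.and_eq_false_iff] at h
    by_cases hc : PySem.Chars.isdigit c
    · have : cs.all PySem.Chars.isdigit = false := by
        rcases h with h | h
        · rw [hc] at h; cases h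
        · exact h
      simp only [checkGo, hc, not_true_eq_false, if_false]
      exact ih _ this
    · simp [checkGo, hc]

-- on an all-digit string A's result is exactly "the accumulated value exceeds 2^31 - 1"
theorem checkGo_of_all (cs : List Char) : ∀ k : Int, 0 ≤ k →
    cs.all PySem.Chars.isdigit = true →
    checkGo cs k = decide (2 ^ 31 - 1 < pvVal k cs) := by
  induction cs with
  | nil =>
    intro k hk _
    simp only [checkGo, pvVal_nil]
    split_ifs with h
    · simp; omega
    · simp; omega
  | cons c cs ih =>
    intro k hk h
    simp only [List.all_cons, Bool.and_eq_true] at h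
    obtain ⟨hc1, _⟩ := isdigit_bounds h.1
    simp only [checkGo, h.1, not_true_eq_false, if_false, pvVal_cons]
    exact ih _ (by omega) h.2

-- ===== VERDICT (by name: the statement is the Claim_ definition above) =====
theorem check_spec : Claim_equal_check := by
  intro s _
  unfold Spec_check check check_alt
  by_cases hall : s.toList.all PySem.Chars.isdigit
  · rw [if_neg (by simp [hall])]
    show checkGo s.toList 0
      = (decide (10 < (s.toList.dropWhile (· == '0')).length)
        || (decide ((s.toList.dropWhile (· == '0')).length = 10)
            && decide ("2147483647".toList < s.toList.dropWhile (· == '0'))))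
    rw [checkGo_of_all s.toList 0 le_rfl hall, ← pvVal_dropZeros s.toList]
    have hsub : ∀ x ∈ s.toList.dropWhile (· == '0'), x ∈ s.toList :=
      fun x hx => (List.dropWhile_sublist _).subset hx
    have hhead := List.head?_dropWhile_not (p := (· == '0')) s.toList
    generalize ht : s.toList.dropWhile (· == '0') = t at *
    have htd : t.all PySem.Chars.isdigit = true :=
      List.all_eq_true.2 fun c hc => List.all_eq_true.1 hall c (hsub c hc)
    obtain ⟨hb1, hb2⟩ := pvVal_bounds htd
    rcases lt_trichotomy t.length 10 with hl | hl | hl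
    · -- fewer than 10 significant digits: both sides are false
      have h10 : (10 : Int) ^ t.length ≤ 10 ^ 9 :=
        pow_le_pow_right₀ (by norm_num) (by omega)
      have hsmall : ¬ ((2 : Int) ^ 31 - 1 < pvVal 0 t) := by
        have : (10 : Int) ^ 9 < 2 ^ 31 - 1 := by norm_num
        omega
      rw [decide_eq_false hsmall, eq_comm, Bool.or_eq_false_iff]
      constructor
      · exact decide_eq_false (by omega)
      · rw [Bool.and_eq_false_iff]
        exact Or.inl (decide_eq_false (by omega))
    · -- exactly 10 significant digits: compare lexicographically with "2147483647"
      have hlex := pvVal_lt_iff_lex t "2147483647".toList htd (by decide)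
        (by rw [hl]; decide)
      have hL : pvVal 0 "2147483647".toList = 2 ^ 31 - 1 := by decide
      rw [hL] at hlex
      have hD : decide ((2 : Int) ^ 31 - 1 < pvVal 0 t)
          = decide ("2147483647".toList < t) := decide_eq_decide.mpr hlex
      rw [hD, hl]
      simp
    · -- more than 10 significant digits: both sides are true
      have hne : t ≠ [] := by
        intro h; rw [h] at hl; simp at hl
      obtain ⟨c, t', rfl⟩ := List.exists_cons_of_ne_nil hne
      have hc0 : ¬ (c == '0') = true := by simpa using hhead
      have hcd := List.all_eq_true.1 htd c (by simp)
      obtain ⟨hc1, hc2⟩ := isdigit_bounds hcd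
      have hc48 : 48 < c.toNat := by
        rcases Nat.lt_or_ge 48 c.toNat with h | h
        · exact h
        · exfalso
          have h0 : '0'.toNat = 48 := rfl
          have hc : c = '0' := (char_eq_iff '0' c).2 (by omega)
          rw [hc] at hc0
          exact hc0 rfl
      have htd' : t'.all PySem.Chars.isdigit = true :=
        List.all_eq_true.2 fun x hx => List.all_eq_true.1 htd x (List.mem_cons_of_mem c hx)
      obtain ⟨ht1, ht2⟩ := pvVal_bounds htd'
      have hlen : 10 ≤ t'.length := by
        simp only [List.length_cons] at hl; omega
      have hp : (10 : Int) ^ 10 ≤ 10 ^ t'.length :=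
        pow_le_pow_right₀ (by norm_num) hlen
      have hbig : (2 : Int) ^ 31 - 1 < pvVal 0 (c :: t') := by
        rw [pvVal_cons, pvVal_split]
        have : (10 : Int) ^ 10 = 10000000000 := by norm_num
        nlinarith
      rw [decide_eq_true hbig, eq_comm, Bool.or_eq_true]
      exact Or.inl (decide_eq_true (by simp only [List.length_cons]; omega))
  · rw [checkGo_of_not_all s.toList 0 (by simpa using hall), if_pos (by simpa using hall)]
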